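-- pv_equiv track=rewrite | github.com/emilyeyou/Python-Girls | wikipedia.py | GetArtistUrl
-- ===== SOURCE A (Python) =====
-- def GetArtistUrl (artist):
--     url = "https://en.wikipedia.org/wiki/"
--
-- # NOT SURE
--     # parse out the main artist with no featuring artists
--     main_artist = artist.split("Featuring")[0]
--     new_main_artist = main_artist.split("&")[0]
--     final_artist = new_main_artist.split("X")[0]
--
--     # create new url using wikipedia format (i.e. https://en.wikipedia.org/wiki/One_Right_Now)
--     # separates artist name by replacing spaces with underscrores between words
--     artist_name = final_artist.split()
--     for word in artist_name:
--         url += word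
-- # NOT SURE IF REPLACE FUNCTION WORKS
--         url = url.replace(' ', '_')
--         #url += '_'
--     return url
-- ===== SOURCE B (Python) =====
-- def GetArtistUrl(artist):
--     prefix = "https://en.wikipedia.org/wiki/"
--     # cut at the earliest occurrence of any separator marker (default: whole string)
--     cut = len(artist)
--     for m in ("Featuring", "&", "X"):
--         i = artist.find(m)
--         if i != -1 and i < cut:
--             cut = i
--     # join the whitespace-split words with no separator (matching A, whose
--     # replace(' ', '_') never fires because the joined words contain no spaces)
--     return prefix + "".join(artist[:cut].split())
-- ===== Notes on version B (the rewrite author's own statement) =====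
-- stated objective: simpler
-- what changed: Replaces the three chained split(marker)[0] passes and the word loop with mutating replace by a single cut position (minimum of the markers' find indices) followed by one slice and ''.join of its whitespace-split words.
import Mathlib
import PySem

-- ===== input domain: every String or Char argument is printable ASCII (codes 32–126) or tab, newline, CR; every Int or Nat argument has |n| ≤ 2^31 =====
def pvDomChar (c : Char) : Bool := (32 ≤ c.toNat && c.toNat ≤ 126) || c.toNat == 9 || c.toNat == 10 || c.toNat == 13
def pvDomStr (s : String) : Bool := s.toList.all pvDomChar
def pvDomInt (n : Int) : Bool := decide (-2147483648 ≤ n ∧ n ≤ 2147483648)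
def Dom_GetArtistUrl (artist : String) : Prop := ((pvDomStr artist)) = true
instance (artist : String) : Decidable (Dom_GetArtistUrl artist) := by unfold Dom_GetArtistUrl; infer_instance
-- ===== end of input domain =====

-- B replaces A's three chained split(marker)[0] passes and its word loop with mutating replace
-- by one cut position (minimum of the markers' find indices), one slice and one ''.join (objective: simpler).

-- ===== PORT A =====
-- str.split with a non-empty separator never raises and never returns an empty list,
-- so the .getD defaults below are unreachable; [0] is PySem.List.pyGet?.
def GetArtistUrl (artist : String) : String :=
  let url := "https://en.wikipedia.org/wiki/"
  let main_artist := (PySem.List.pyGet? ((PySem.Str.split? artist "Featuring").getD []) 0).getD ""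
  let new_main_artist := (PySem.List.pyGet? ((PySem.Str.split? main_artist "&").getD []) 0).getD ""
  let final_artist := (PySem.List.pyGet? ((PySem.Str.split? new_main_artist "X").getD []) 0).getD ""
  let artist_name := PySem.Str.split₀ final_artist
  artist_name.foldl (fun url word => PySem.Str.replace (url ++ word) " " "_") url

-- ===== PORT B =====
def GetArtistUrl_alt (artist : String) : String :=
  let prefixUrl := "https://en.wikipedia.org/wiki/"
  let cut := (["Featuring", "&", "X"] : List String).foldl
    (fun cut m =>
      let i := PySem.Str.find artist m
      if i ≠ -1 ∧ i < cut then i else cut)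
    (PySem.Str.len artist)
  prefixUrl ++ PySem.Str.join "" (PySem.Str.split₀ (PySem.Str.slice artist none (some cut)))

-- ===== PRECONDITION & SPEC =====
def Spec_GetArtistUrl (artist : String) (out : String) : Prop := out = GetArtistUrl_alt artist
instance (artist : String) (out : String) : Decidable (Spec_GetArtistUrl artist out) := by unfold Spec_GetArtistUrl; infer_instance

-- ===== CLAIM (what is proved, stated in full; the proofs are below) =====
def Claim_equal_GetArtistUrl : Prop := ∀ (artist : String), Dom_GetArtistUrl artist → Spec_GetArtistUrl artist (GetArtistUrl artist)

-- ===== LEMMAS AND PROOFS =====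

/-- The longest prefix of `l` that stops at the first occurrence of `sep`. -/
def takeUntil (sep : List Char) : List Char → List Char
  | [] => []
  | c :: rest => if sep.isPrefixOf (c :: rest) then [] else c :: takeUntil sep rest

/-- The cut position B computes: first occurrence of "Featuring", then of '&' and 'X'
restricted to what is left, as a single Nat. -/
def cutN (L : List Char) : Nat :=
  let F := PySem.Chars.find L ("Featuring" : String).toList
  let a := PySem.Chars.find L ['&']
  let x := PySem.Chars.find L ['X']
  let n1 := if F = -1 then L.length else F.toNat
  let n2 := if 0 ≤ a ∧ a < (n1 : Int) then a.toNat else n1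
  if 0 ≤ x ∧ x < (n2 : Int) then x.toNat else n2


-- Literal-string facts (proved once; `String.toList` on literals is expensive to reduce)
theorem litFeat_ne : ("Featuring" : String).toList ≠ [] := by simp
theorem litAmp : ("&" : String).toList = ['&'] := by simp
theorem litX : ("X" : String).toList = ['X'] := by simp
theorem litSpace : (" " : String).toList = [' '] := by simp
theorem litUnderscore : ("_" : String).toList = ['_'] := by simp
theorem litEmpty : ("" : String).toList = [] := by simp
theorem litUrl : ' ' ∉ ("https://en.wikipedia.org/wiki/" : String).toList := by simp

theorem splitOn_go_head (sep : List Char) (hsep : sep ≠ []) :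
    ∀ (fuel : Nat) (l cur : List Char) (acc : List (List Char)), l.length ≤ fuel →
      ∃ t, PySem.Chars.splitOn.go sep fuel l cur acc =
        acc.reverse ++ (cur.reverse ++ takeUntil sep l) :: t := by
  intro fuel
  induction fuel with
  | zero =>
    intro l cur acc hl
    have : l = [] := by cases l <;> simp_all
    subst this
    exact ⟨[], by rw [PySem.Chars.splitOn.go]; simp [takeUntil]⟩
  | succ fuel ih =>
    intro l cur acc hl
    cases l with
    | nil =>
      refine ⟨[], ?_⟩
      rw [PySem.Chars.splitOn.go]
      simp [takeUntil]
      omega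
    | cons c rest =>
      rw [PySem.Chars.splitOn.go]
      by_cases hp : sep.isPrefixOf (c :: rest)
      · simp only [hp, if_true]
        have hlen : (List.drop sep.length (c :: rest)).length ≤ fuel := by
          have h1 : 1 ≤ sep.length := by cases sep <;> simp_all
          have h2 := List.length_drop (l := (c :: rest)) (i := sep.length)
          simp only [List.length_cons] at h2 hl
          omega
        obtain ⟨t, ht⟩ := ih (List.drop sep.length (c :: rest)) [] (cur.reverse :: acc) hlen
        refine ⟨(takeUntil sep (List.drop sep.length (c :: rest))) :: t, ?_⟩
        rw [ht]
        simp [takeUntil, hp]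
      · simp only [hp]
        obtain ⟨t, ht⟩ := ih rest (c :: cur) acc (by simpa using Nat.lt_succ_iff.mp (by simpa using hl))
        refine ⟨t, ?_⟩
        rw [ht]
        simp [takeUntil, hp]

theorem splitOn_head (s sep : List Char) (hsep : sep ≠ []) :
    ∃ t, PySem.Chars.splitOn s sep = takeUntil sep s :: t := by
  obtain ⟨t, ht⟩ := splitOn_go_head sep hsep (s.length + 1) s [] [] (by omega)
  exact ⟨t, by simpa [PySem.Chars.splitOn] using ht⟩

theorem find_unique (s sub : List Char) (k : Nat)
    (h1 : sub <+: s.drop k) (h2 : ∀ i < k, ¬ sub <+: s.drop i) :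
    PySem.Chars.find s sub = k := by
  have hin : sub <:+: s := h1.isInfix.trans (List.drop_suffix k s).isInfix
  have hpos : 0 ≤ PySem.Chars.find s sub := (PySem.Chars.find_nonneg_iff s sub).mpr hin
  obtain ⟨hp, hmin⟩ := PySem.Chars.find_spec hpos
  have hk : (PySem.Chars.find s sub).toNat = k := by
    rcases Nat.lt_trichotomy (PySem.Chars.find s sub).toNat k with h | h | h
    · exact absurd hp (h2 _ h)
    · exact h
    · exact absurd h1 (hmin k h)
  omega

theorem takeUntil_of_not_infix (sep s : List Char) (h : ¬ sep <:+: s) :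
    takeUntil sep s = s := by
  induction s with
  | nil => rfl
  | cons c rest ih =>
    have hnp : ¬ sep.isPrefixOf (c :: rest) = true := by
      intro hp
      exact h (List.IsPrefix.isInfix (List.isPrefixOf_iff_prefix.mp hp))
    have hrest : ¬ sep <:+: rest := fun hi => h (hi.trans (List.suffix_cons c rest).isInfix)
    simp [takeUntil, hnp, ih hrest]

theorem takeUntil_of_first (sep : List Char) (hsep : sep ≠ []) :
    ∀ (n : Nat) (s : List Char), sep <+: s.drop n → (∀ i < n, ¬ sep <+: s.drop i) →
      takeUntil sep s = s.take n := by
  intro n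
  induction n with
  | zero =>
    intro s h1 _
    cases s with
    | nil => simp at h1; simp [h1] at hsep
    | cons c rest =>
      simp only [List.drop_zero] at h1
      simp [takeUntil, List.isPrefixOf_iff_prefix.mpr h1]
  | succ n ih =>
    intro s h1 h2
    cases s with
    | nil => simp at h1; simp [h1] at hsep
    | cons c rest =>
      have hnp : ¬ sep.isPrefixOf (c :: rest) = true := by
        intro hp
        exact h2 0 (by omega) (by simpa using List.isPrefixOf_iff_prefix.mp hp)
      have := ih rest (by simpa using h1) (fun i hi => by
        have := h2 (i + 1) (by omega)
        simpa using this)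
      simp [takeUntil, hnp, this, List.take_succ_cons]

theorem takeUntil_eq (sep s : List Char) (hsep : sep ≠ []) :
    takeUntil sep s = if PySem.Chars.find s sep = -1 then s
      else s.take (PySem.Chars.find s sep).toNat := by
  by_cases h : PySem.Chars.find s sep = -1
  · rw [if_pos h]
    exact takeUntil_of_not_infix sep s ((PySem.Chars.find_eq_neg_one_iff s sep).mp h)
  · rw [if_neg h]
    have hpos : 0 ≤ PySem.Chars.find s sep := by
      have := PySem.Chars.neg_one_le_find s sep
      omega
    obtain ⟨hp, hmin⟩ := PySem.Chars.find_spec hpos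
    exact takeUntil_of_first sep hsep _ s hp hmin

theorem find_lt_length (s sub : List Char) (hsub : sub ≠ []) (h : PySem.Chars.find s sub ≠ -1) :
    PySem.Chars.find s sub < s.length := by
  have hpos : 0 ≤ PySem.Chars.find s sub := by
    have := PySem.Chars.neg_one_le_find s sub
    omega
  obtain ⟨hp, _⟩ := PySem.Chars.find_spec hpos
  have hne : (List.drop (PySem.Chars.find s sub).toNat s) ≠ [] := by
    intro hnil
    rw [hnil, List.prefix_nil] at hp
    exact hsub hp
  have := List.length_drop (l := s) (i := (PySem.Chars.find s sub).toNat)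
  have hlen : 0 < (List.drop (PySem.Chars.find s sub).toNat s).length := List.length_pos_iff.mpr hne
  omega

theorem prefix_singleton_iff (u : List Char) (c : Char) : ([c] <+: u) ↔ u.head? = some c := by
  cases u <;> simp [List.cons_prefix_cons, eq_comm]

theorem prefix_singleton_drop (l : List Char) (i : Nat) (c : Char) :
    ([c] <+: l.drop i) ↔ l[i]? = some c := by
  rw [prefix_singleton_iff, List.head?_drop]

theorem find_take_singleton (s : List Char) (n : Nat) (c : Char) :
    PySem.Chars.find (s.take n) [c] =
      if 0 ≤ PySem.Chars.find s [c] ∧ PySem.Chars.find s [c] < n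
      then PySem.Chars.find s [c] else -1 := by
  set F := PySem.Chars.find s [c] with hF
  by_cases h : 0 ≤ F ∧ F < n
  · rw [if_pos h]
    obtain ⟨hp, hmin⟩ := PySem.Chars.find_spec (s := s) (sub := [c]) h.1
    have hocc : s[F.toNat]? = some c := (prefix_singleton_drop s F.toNat c).mp hp
    have hFn : F.toNat < n := by omega
    have h1 : [c] <+: (s.take n).drop F.toNat := by
      rw [prefix_singleton_drop, List.getElem?_take, if_pos hFn]
      exact hocc
    have h2 : ∀ i < F.toNat, ¬ [c] <+: (s.take n).drop i := by
      intro i hi hpre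
      rw [prefix_singleton_drop, List.getElem?_take] at hpre
      split at hpre
      · exact hmin i hi ((prefix_singleton_drop s i c).mpr hpre)
      · simp at hpre
    have := find_unique (s.take n) [c] F.toNat h1 h2
    omega
  · rw [if_neg h]
    rw [PySem.Chars.find_eq_neg_one_iff]
    intro hin
    have hmem : c ∈ s.take n := by
      rcases hin with ⟨u, v, huv⟩
      have : c ∈ u ++ [c] ++ v := by simp
      rw [huv] at this
      exact this
    obtain ⟨i, hi, hci⟩ := List.getElem_of_mem hmem
    have hilt : i < n := by
      have := List.length_take_le n s
      omega
    have hIs : s[i]? = some c := by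
      have : (s.take n)[i]? = some c := by
        rw [List.getElem?_eq_getElem hi, hci]
      rwa [List.getElem?_take, if_pos hilt] at this
    have hFin : 0 ≤ F := by
      rw [hF, PySem.Chars.find_nonneg_iff]
      have hpre : [c] <+: s.drop i := (prefix_singleton_drop s i c).mpr hIs
      exact hpre.isInfix.trans (List.drop_suffix i s).isInfix
    obtain ⟨_, hmin⟩ := PySem.Chars.find_spec (s := s) (sub := [c]) hFin
    have : F.toNat ≤ i := by
      by_contra hlt
      exact hmin i (by omega) ((prefix_singleton_drop s i c).mpr hIs)
    omega

theorem split₀_go_no_space :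
    ∀ (l cur : List Char) (acc : List (List Char)),
      (∀ w ∈ acc, ' ' ∉ w) → ' ' ∉ cur →
      ∀ w ∈ PySem.Chars.split₀.go l cur acc, ' ' ∉ w := by
  intro l
  induction l with
  | nil =>
    intro cur acc hacc hcur w hw
    rw [PySem.Chars.split₀.go] at hw
    split at hw
    · exact hacc w (by simpa using hw)
    · simp at hw
      rcases hw with hw | hw
      · exact hacc w hw
      · subst hw; simpa using hcur
  | cons c rest ih =>
    intro cur acc hacc hcur w hw
    rw [PySem.Chars.split₀.go] at hw
    by_cases hs : PySem.Chars.isspace c = true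
    · rw [if_pos hs] at hw
      split at hw
      · exact ih [] acc hacc (by simp) w hw
      · refine ih [] (cur.reverse :: acc) ?_ (by simp) w hw
        intro v hv
        simp at hv
        rcases hv with hv | hv
        · subst hv; simpa using hcur
        · exact hacc v hv
    · rw [if_neg hs] at hw
      refine ih (c :: cur) acc hacc ?_ w hw
      intro hmem
      simp at hmem
      rcases hmem with hmem | hmem
      · rw [← hmem] at hs; exact hs (by decide)
      · exact hcur hmem

theorem split₀_no_space (s : List Char) : ∀ w ∈ PySem.Chars.split₀ s, ' ' ∉ w :=
  split₀_go_no_space s [] [] (by simp) (by simp)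

theorem replace_go_id (new : List Char) :
    ∀ (fuel : Nat) (l acc : List Char), ' ' ∉ l →
      PySem.Chars.replace.go [' '] new fuel l acc = acc.reverse ++ l := by
  intro fuel
  induction fuel with
  | zero => intro l acc _; rw [PySem.Chars.replace.go]
  | succ fuel ih =>
    intro l acc hl
    cases l with
    | nil => rw [PySem.Chars.replace.go]; simp; omega
    | cons c t =>
      rw [PySem.Chars.replace.go]
      have hc : c ≠ ' ' := fun h => hl (by simp [h])
      have hnp : ¬ ([' '].isPrefixOf (c :: t)) = true := by
        simp [List.isPrefixOf_iff_prefix, List.cons_prefix_cons]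
        intro h
        exact absurd h.symm hc
      rw [if_neg hnp, ih t (c :: acc) (fun h => hl (by simp [h]))]
      simp

theorem replace_space_id (l : List Char) (h : ' ' ∉ l) :
    PySem.Chars.replace l [' '] ['_'] = l := by
  rw [PySem.Chars.replace]
  rw [if_neg (by simp)]
  simpa using replace_go_id ['_'] l.length l [] h

theorem join_nil_eq_flatten (ps : List (List Char)) : PySem.Chars.join [] ps = ps.flatten := by
  simp only [PySem.Chars.join, List.intercalate]
  induction ps with
  | nil => simp
  | cons p t ih =>
    cases t with
    | nil => simp
    | cons q u =>
      rw [List.intersperse_cons₂]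
      simp_all

theorem foldA (ws : List String) (u : String)
    (hw : ∀ w ∈ ws, ' ' ∉ w.toList) (hu : ' ' ∉ u.toList) :
    (ws.foldl (fun url word => PySem.Str.replace (url ++ word) " " "_") u).toList =
      u.toList ++ (ws.map String.toList).flatten := by
  induction ws generalizing u with
  | nil => simp
  | cons w t ih =>
    have hnw : ' ' ∉ w.toList := hw w (by simp)
    have hnu : ' ' ∉ (u ++ w).toList := by
      rw [String.toList_append]
      simp [hu, hnw]
    have hstep : (PySem.Str.replace (u ++ w) " " "_").toList = u.toList ++ w.toList := by
      rw [PySem.Str.toList_replace]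
      rw [litSpace, litUnderscore, String.toList_append]
      rw [replace_space_id _ (by rw [← String.toList_append]; exact hnu)]
    simp only [List.foldl_cons]
    rw [ih (PySem.Str.replace (u ++ w) " " "_") (fun v hv => hw v (by simp [hv]))
      (by rw [hstep]; simp [hu, hnw])]
    rw [hstep]
    simp

theorem head_split (s sep : String) (h : sep.toList ≠ []) :
    ((PySem.List.pyGet? ((PySem.Str.split? s sep).getD []) 0).getD "").toList
      = takeUntil sep.toList s.toList := by
  have hmap := PySem.Str.split?_map s sep
  rw [PySem.Chars.split?, if_neg (by simpa using h)] at hmap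
  obtain ⟨t, ht⟩ := splitOn_head s.toList sep.toList h
  cases hsp : PySem.Str.split? s sep with
  | none => rw [hsp] at hmap; simp at hmap
  | some parts =>
    rw [hsp] at hmap
    simp only [Option.map_some, Option.some.injEq] at hmap
    rw [ht] at hmap
    cases parts with
    | nil => simp at hmap
    | cons p pt =>
      simp only [List.map_cons, List.cons.injEq] at hmap
      simp [PySem.List.pyGet?, PySem.List.pyIdx?]
      exact hmap.1

theorem chain_cut (s1 : String) (L : List Char) (hs1 : s1.toList = L) :
    ((PySem.List.pyGet? ((PySem.Str.split? ((PySem.List.pyGet? ((PySem.Str.split?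
        ((PySem.List.pyGet? ((PySem.Str.split? s1 "Featuring").getD []) 0).getD "")
        "&").getD []) 0).getD "") "X").getD []) 0).getD "").toList
      = L.take (cutN L) := by
  set F := PySem.Chars.find L ("Featuring" : String).toList with hF
  set a := PySem.Chars.find L ['&'] with ha
  set x := PySem.Chars.find L ['X'] with hx
  set n1 : Nat := if F = -1 then L.length else F.toNat with hn1
  set n2 : Nat := if 0 ≤ a ∧ a < (n1 : Int) then a.toNat else n1 with hn2
  have h1 : ((PySem.List.pyGet? ((PySem.Str.split? s1 "Featuring").getD []) 0).getD "").toList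
      = L.take n1 := by
    rw [head_split s1 "Featuring" litFeat_ne, hs1, takeUntil_eq _ _ litFeat_ne, ← hF, hn1]
    split_ifs with h
    · exact List.take_length.symm
    · rfl
  have hfind2 : PySem.Chars.find ((PySem.List.pyGet? ((PySem.Str.split? s1 "Featuring").getD []) 0).getD "").toList ['&']
      = if 0 ≤ a ∧ a < (n1 : Int) then a else -1 := by
    rw [h1, find_take_singleton, ← ha]
  have h2 : ((PySem.List.pyGet? ((PySem.Str.split? ((PySem.List.pyGet? ((PySem.Str.split? s1 "Featuring").getD []) 0).getD "") "&").getD []) 0).getD "").toList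
      = L.take n2 := by
    rw [head_split _ "&" (by simp [litAmp]), litAmp, takeUntil_eq _ _ (by simp), hfind2]
    by_cases hc : 0 ≤ a ∧ a < (n1 : Int)
    · rw [if_pos hc, if_neg (by omega), h1, List.take_take, hn2, if_pos hc,
        Nat.min_eq_left (by omega)]
    · rw [if_neg hc, if_pos rfl, h1, hn2, if_neg hc]
  have hfind3 : PySem.Chars.find ((PySem.List.pyGet? ((PySem.Str.split? ((PySem.List.pyGet? ((PySem.Str.split? s1 "Featuring").getD []) 0).getD "") "&").getD []) 0).getD "").toList ['X']
      = if 0 ≤ x ∧ x < (n2 : Int) then x else -1 := by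
    rw [h2, find_take_singleton, ← hx]
  rw [head_split _ "X" (by simp [litX]), litX, takeUntil_eq _ _ (by simp), hfind3]
  show _ = L.take (cutN L)
  simp only [cutN]
  simp only [← hF, ← ha, ← hx, ← hn1, ← hn2]
  by_cases hc : 0 ≤ x ∧ x < (n2 : Int)
  · rw [if_pos hc, if_neg (by omega), h2, List.take_take, if_pos hc,
      Nat.min_eq_left (by omega)]
  · rw [if_neg hc, if_pos rfl, h2, if_neg hc]

theorem foldB (s : String) (L : List Char) (hs : s.toList = L) :
    (["Featuring", "&", "X"] : List String).foldl
      (fun cut m =>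
        let i := PySem.Str.find s m
        if i ≠ -1 ∧ i < cut then i else cut)
      (PySem.Str.len s) = (cutN L : Int) := by
  simp only [List.foldl_cons, List.foldl_nil]
  simp only [cutN]
  simp only [PySem.Str.find_eq, PySem.Str.len_eq, hs, litAmp, litX]
  have hFd : PySem.Chars.find L ("Featuring" : String).toList = -1 ∨
      (0 ≤ PySem.Chars.find L ("Featuring" : String).toList ∧
        PySem.Chars.find L ("Featuring" : String).toList < (L.length : Int)) := by
    by_cases hFe : PySem.Chars.find L ("Featuring" : String).toList = -1
    · exact Or.inl hFe
    · refine Or.inr ⟨?_, find_lt_length L _ litFeat_ne hFe⟩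
      have := PySem.Chars.neg_one_le_find L ("Featuring" : String).toList
      omega
  have had := PySem.Chars.neg_one_le_find L ['&']
  have hxd := PySem.Chars.neg_one_le_find L ['X']
  generalize PySem.Chars.find L ("Featuring" : String).toList = F at hFd ⊢
  generalize PySem.Chars.find L ['&'] = a at had ⊢
  generalize PySem.Chars.find L ['X'] = x at hxd ⊢
  split_ifs <;> omega

theorem GetArtistUrl_spec_aux (artist : String) :
    GetArtistUrl artist = GetArtistUrl_alt artist := by
  rw [← String.toList_inj]
  simp only [GetArtistUrl, GetArtistUrl_alt]
  have hwords : ∀ w ∈ PySem.Str.split₀ ((PySem.List.pyGet? ((PySem.Str.split? ((PySem.List.pyGet? ((PySem.Str.split?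
        ((PySem.List.pyGet? ((PySem.Str.split? artist "Featuring").getD []) 0).getD "")
        "&").getD []) 0).getD "") "X").getD []) 0).getD ""), ' ' ∉ w.toList := by
    intro w hw
    have hmem : w.toList ∈ (PySem.Str.split₀ _).map String.toList := List.mem_map_of_mem hw
    rw [PySem.Str.split₀_map_toList] at hmem
    exact split₀_no_space _ w.toList hmem
  rw [foldA _ _ hwords litUrl, PySem.Str.split₀_map_toList]
  rw [String.toList_append, PySem.Str.toList_join, PySem.Str.split₀_map_toList]
  rw [litEmpty, join_nil_eq_flatten]
  rw [chain_cut artist artist.toList rfl]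
  rw [foldB artist artist.toList rfl, PySem.Str.toList_slice, PySem.Chars.slice_eq_listSlice,
    PySem.List.slice_to_natCast]

-- ===== VERDICT (by name: the statement is the Claim_ definition above) =====
theorem GetArtistUrl_spec : Claim_equal_GetArtistUrl := by
  intro artist _
  exact GetArtistUrl_spec_aux artist
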